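-- pv_equiv track=rewrite | github.com/gschivley/PowerGenome-tools | tests/test_cluster_app.py | apply_default_grouping
-- ===== SOURCE A (Python) =====
-- DEFAULT_TECH_GROUPS = {
--     "Biomass": {
--         "Wood/Wood Waste Biomass",
--         "Landfill Gas",
--         "Municipal Solid Waste",
--         "Other Waste Biomass",
--     },
--     "Other_peaker": {
--         "Natural Gas Internal Combustion Engine",
--         "Petroleum Liquids",
--     },
-- }
--
-- def apply_default_grouping(tech_group, enabled=True, group_map=None):
--     """Collapse technologies into groups using provided map when enabled."""
--     if not enabled:
--         return tech_group
--     mapping = group_map if group_map is not None else DEFAULT_TECH_GROUPS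
--     for group_name, members in mapping.items():
--         if tech_group in members:
--             return group_name
--     return tech_group
-- ===== SOURCE B (Python) =====
-- DEFAULT_TECH_GROUPS = {
--     "Biomass": {
--         "Wood/Wood Waste Biomass",
--         "Landfill Gas",
--         "Municipal Solid Waste",
--         "Other Waste Biomass",
--     },
--     "Other_peaker": {
--         "Natural Gas Internal Combustion Engine",
--         "Petroleum Liquids",
--     },
-- }
--
-- def apply_default_grouping(tech_group, enabled=True, group_map=None):
--     """Collapse technologies into groups using provided map when enabled."""
--     if not enabled:
--         return tech_group
--     mapping = group_map if group_map is not None else DEFAULT_TECH_GROUPS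
--     index = {}
--     for group_name, members in mapping.items():
--         for tech in members:
--             index.setdefault(tech, group_name)
--     return index.get(tech_group, tech_group)
-- ===== Notes on version B (the rewrite author's own statement) =====
-- stated objective: idiomatic
-- what changed: B builds a flat reverse index (tech -> group) once with setdefault so the first group containing a tech wins, then answers with a single dict lookup with tech_group as the default, replacing A's per-group membership scan with early return.
import Mathlib
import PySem

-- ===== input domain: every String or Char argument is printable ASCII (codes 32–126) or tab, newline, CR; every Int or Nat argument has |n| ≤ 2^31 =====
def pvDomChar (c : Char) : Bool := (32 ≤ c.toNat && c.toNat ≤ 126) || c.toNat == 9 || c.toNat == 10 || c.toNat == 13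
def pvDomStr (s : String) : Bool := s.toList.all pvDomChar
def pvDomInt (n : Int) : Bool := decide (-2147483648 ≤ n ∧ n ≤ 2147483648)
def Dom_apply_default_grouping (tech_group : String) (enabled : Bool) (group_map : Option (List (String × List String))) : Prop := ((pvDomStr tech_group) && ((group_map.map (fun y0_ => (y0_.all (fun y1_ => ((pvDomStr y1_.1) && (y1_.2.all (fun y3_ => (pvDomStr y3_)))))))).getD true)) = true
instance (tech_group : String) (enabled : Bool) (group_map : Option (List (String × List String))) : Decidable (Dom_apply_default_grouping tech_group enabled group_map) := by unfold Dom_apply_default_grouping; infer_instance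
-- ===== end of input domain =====

-- B replaces A's per-group membership scan by a reverse index dict (tech -> first group) built once with setdefault, answered by one lookup with tech_group as default; objective: idiomatic.


-- module constant DEFAULT_TECH_GROUPS (sets rendered as distinct-element lists)
def pvDefaultTechGroups : List (String × List String) :=
  [("Biomass", ["Wood/Wood Waste Biomass", "Landfill Gas", "Municipal Solid Waste", "Other Waste Biomass"]),
   ("Other_peaker", ["Natural Gas Internal Combustion Engine", "Petroleum Liquids"])]

-- ===== PORT A =====
-- A's 'for group_name, members in mapping.items(): if tech_group in members: return group_name'
def pvALoop (tech_group : String) : List (String × List String) → String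
  | [] => tech_group
  | (group_name, members) :: rest =>
      if tech_group ∈ members then group_name else pvALoop tech_group rest

def apply_default_grouping (tech_group : String) (enabled : Bool) (group_map : Option (List (String × List String))) : String :=
  if !enabled then tech_group
  else
    let mapping := group_map.getD pvDefaultTechGroups
    pvALoop tech_group mapping

-- ===== PORT B =====
-- B's reverse index: for group_name, members in mapping.items(): for tech in members: index.setdefault(tech, group_name)
def pvBIndex (mapping : List (String × List String)) : PySem.Dict String String :=
  mapping.foldl (fun d p => p.2.foldl (fun d t => d.setdefault t p.1) d) PySem.Dict.empty

def apply_default_grouping_alt (tech_group : String) (enabled : Bool) (group_map : Option (List (String × List String))) : String :=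
  if !enabled then tech_group
  else
    let mapping := group_map.getD pvDefaultTechGroups
    (pvBIndex mapping).getD tech_group tech_group

-- ===== PRECONDITION & SPEC =====
def Spec_apply_default_grouping (tech_group : String) (enabled : Bool) (group_map : Option (List (String × List String))) (out : String) : Prop := out = apply_default_grouping_alt tech_group enabled group_map
instance (tech_group : String) (enabled : Bool) (group_map : Option (List (String × List String))) (out : String) : Decidable (Spec_apply_default_grouping tech_group enabled group_map out) := by unfold Spec_apply_default_grouping; infer_instance

-- ===== CLAIM (what is proved, stated in full; the proofs are below) =====
def Claim_equal_apply_default_grouping : Prop := ∀ (tech_group : String) (enabled : Bool) (group_map : Option (List (String × List String))), Dom_apply_default_grouping tech_group enabled group_map → Spec_apply_default_grouping tech_group enabled group_map (apply_default_grouping tech_group enabled group_map)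

-- ===== LEMMAS AND PROOFS =====

-- first group of m whose member list contains tg (proof-side characterisation)
def pvFind (tg : String) : List (String × List String) → Option String
  | [] => none
  | (g, ms) :: rest => if tg ∈ ms then some g else pvFind tg rest

theorem pvALoop_eq_find (tg : String) (m : List (String × List String)) :
    pvALoop tg m = (pvFind tg m).getD tg := by
  induction m with
  | nil => rfl
  | cons p rest ih =>
      obtain ⟨g, ms⟩ := p
      simp only [pvALoop, pvFind]
      split_ifs <;> simp [ih]

theorem get?_setdefault (d : PySem.Dict String String) (k v x : String) :
    (d.setdefault k v).get? x =
      if (d.get? x).isSome then d.get? x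
      else if x = k then (if d.contains k then none else some v) else none := by
  by_cases hc : d.contains k = true
  · have hsd : d.setdefault k v = d := by simp [PySem.Dict.setdefault, hc]
    rw [hsd]
    by_cases hs : (d.get? x).isSome
    · simp [hs]
    · simp only [hs, if_false]
      by_cases hx : x = k
      · subst hx
        rw [PySem.Dict.contains_eq_isSome_get?] at hc
        simp [hs] at hc
      · have hn : d.get? x = none := Option.not_isSome_iff_eq_none.mp (by simpa using hs)
        simp [hx, hn]
  · have hcf : d.contains k = false := by simpa using hc
    have hsd : d.setdefault k v = d.insert k v := by
      simp only [PySem.Dict.setdefault, hcf, Bool.false_eq_true, if_false]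
      have := PySem.Dict.items_insert_of_not_contains (d := d) (k := k) (v := v) hcf
      cases h : d.insert k v with
      | mk items => simp only [PySem.Dict.items, h] at this; simp [this]
    rw [hsd, PySem.Dict.get?_insert]
    by_cases hx : x = k
    · subst hx
      have hn : d.get? x = none := by
        rw [PySem.Dict.contains_eq_isSome_get?] at hcf
        exact Option.not_isSome_iff_eq_none.mp (by simp [hcf])
      simp [hn, hcf]
    · by_cases hs : (d.get? x).isSome
      · simp [hx, hs]
      · have hn : d.get? x = none := Option.not_isSome_iff_eq_none.mp (by simpa using hs)
        simp [hx, hn]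

theorem inner_loop (g tg : String) (ms : List String) (d : PySem.Dict String String) :
    ((ms.foldl (fun d t => d.setdefault t g) d).get? tg) =
      if (d.get? tg).isSome then d.get? tg
      else if tg ∈ ms then some g else none := by
  induction ms generalizing d with
  | nil =>
      by_cases hs : (d.get? tg).isSome
      · simp [hs]
      · have hn : d.get? tg = none := Option.not_isSome_iff_eq_none.mp (by simpa using hs)
        simp [hn]
  | cons t rest ih =>
      simp only [List.foldl_cons]
      rw [ih]
      rw [get?_setdefault]
      by_cases hs : (d.get? tg).isSome
      · simp [hs]
      · simp only [hs, if_false]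
        by_cases hx : tg = t
        · subst hx
          by_cases hc : d.contains tg = true
          · rw [PySem.Dict.contains_eq_isSome_get?] at hc
            simp [hs] at hc
          · have hcf : d.contains tg = false := by simpa using hc
            simp [hcf]
        · simp [hx]

theorem outer_loop (tg : String) (m : List (String × List String)) (d : PySem.Dict String String) :
    ((m.foldl (fun d p => p.2.foldl (fun d t => d.setdefault t p.1) d) d).get? tg) =
      if (d.get? tg).isSome then d.get? tg else pvFind tg m := by
  induction m generalizing d with
  | nil =>
      by_cases hs : (d.get? tg).isSome
      · simp [pvFind, hs]
      · have hn : d.get? tg = none := Option.not_isSome_iff_eq_none.mp (by simpa using hs)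
        simp [pvFind, hn]
  | cons p rest ih =>
      obtain ⟨g, ms⟩ := p
      simp only [List.foldl_cons]
      rw [ih, inner_loop]
      by_cases hs : (d.get? tg).isSome
      · simp [hs]
      · simp only [hs, if_false, pvFind]
        by_cases hm : tg ∈ ms <;> simp [hm]

theorem bIndex_getD (tg : String) (m : List (String × List String)) :
    (pvBIndex m).getD tg tg = (pvFind tg m).getD tg := by
  rw [PySem.Dict.getD_eq_get?_getD]
  unfold pvBIndex
  rw [outer_loop]
  simp [PySem.Dict.get?_empty]

-- ===== VERDICT (by name: the statement is the Claim_ definition above) =====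
theorem apply_default_grouping_spec : Claim_equal_apply_default_grouping := by
  intro tg enabled gm _
  unfold Spec_apply_default_grouping apply_default_grouping apply_default_grouping_alt
  cases enabled with
  | false => rfl
  | true => simp only [Bool.not_true, if_false, pvALoop_eq_find, bIndex_getD]
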